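-- pv_equiv track=rewrite | github.com/EmilioGalimberti/finalAED | practico/Actividades/ACT 9.py | palabra_con_x_o_y
-- ===== SOURCE A (Python) =====
-- def palabra_con_x_o_y(texto):
--         cont_letras = 0
--         cont_palabras = 0
--         cont_palabras_x_y = False
--         acum_x_o_y = 0
--         for caracter in texto:
--             if caracter != " " and caracter != ".": #contador letra
--                 cont_letras += 1
--                 if caracter == "x" or caracter == "y":
--                     cont_palabras_x_y = True
--             else:
--                 if cont_letras > 0:         #contador palabra que tiene x o y
--                     cont_palabras += 1
--                 if cont_palabras_x_y is True:
--                     acum_x_o_y +=1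
--                 cont_letras= 0
--                 cont_palabras_x_y = False
--         return acum_x_o_y
-- ===== SOURCE B (Python) =====
-- def palabra_con_x_o_y(texto):
--     # Split into separator-terminated words: unify '.' into ' ', split, drop the
--     # trailing (unterminated) chunk, then count words containing 'x' or 'y'.
--     parts = texto.replace(".", " ").split(" ")
--     return sum(1 for w in parts[:-1] if "x" in w or "y" in w)
-- ===== Notes on version B (the rewrite author's own statement) =====
-- stated objective: idiomatic
-- what changed: Replaces the stateful character loop (cont_letras/flag bookkeeping) by normalize-separators + split + one counting pass over the separator-terminated words (parts[:-1]).
import Mathlib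
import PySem

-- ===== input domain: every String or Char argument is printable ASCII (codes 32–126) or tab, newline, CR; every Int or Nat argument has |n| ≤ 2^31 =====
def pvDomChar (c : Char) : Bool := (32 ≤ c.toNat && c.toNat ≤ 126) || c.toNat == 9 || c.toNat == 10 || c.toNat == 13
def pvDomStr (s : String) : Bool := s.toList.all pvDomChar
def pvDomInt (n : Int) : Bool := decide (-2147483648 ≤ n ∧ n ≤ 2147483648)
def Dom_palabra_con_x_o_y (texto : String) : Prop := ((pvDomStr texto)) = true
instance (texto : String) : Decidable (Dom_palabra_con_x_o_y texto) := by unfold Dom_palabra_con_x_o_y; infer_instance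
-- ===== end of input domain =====

-- B replaces A's stateful character loop by normalize + split + a counting pass (idiomatic; same cost).

-- ===== PORT A =====
-- state = (cont_letras, cont_palabras, cont_palabras_x_y, acum_x_o_y)
def palabra_con_x_o_y (texto : String) : Int :=
  (texto.toList.foldl
    (fun (st : Int × Int × Bool × Int) caracter =>
      let cont_letras := st.1
      let cont_palabras := st.2.1
      let cont_palabras_x_y := st.2.2.1
      let acum_x_o_y := st.2.2.2
      if caracter ≠ ' ' ∧ caracter ≠ '.' then
        (cont_letras + 1, cont_palabras,
         (if caracter = 'x' ∨ caracter = 'y' then true else cont_palabras_x_y),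
         acum_x_o_y)
      else
        (0,
         (if cont_letras > 0 then cont_palabras + 1 else cont_palabras),
         false,
         (if cont_palabras_x_y = true then acum_x_o_y + 1 else acum_x_o_y)))
    (0, 0, false, 0)).2.2.2

-- ===== PORT B =====
def palabra_con_x_o_y_alt (texto : String) : Int :=
  (PySem.List.slice
      (PySem.Chars.splitOn (PySem.Chars.replace texto.toList ['.'] [' ']) [' '])
      none (some (-1))).foldl
    (fun acc w => if PySem.Chars.isIn ['x'] w || PySem.Chars.isIn ['y'] w then acc + 1 else acc)
    (0 : Int)

-- ===== PRECONDITION & SPEC =====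
def Spec_palabra_con_x_o_y (texto : String) (out : Int) : Prop := out = palabra_con_x_o_y_alt texto
instance (texto : String) (out : Int) : Decidable (Spec_palabra_con_x_o_y texto out) := by unfold Spec_palabra_con_x_o_y; infer_instance

-- ===== CLAIM (what is proved, stated in full; the proofs are below) =====
def Claim_equal_palabra_con_x_o_y : Prop := ∀ (texto : String), Dom_palabra_con_x_o_y texto → Spec_palabra_con_x_o_y texto (palabra_con_x_o_y texto)

-- ===== LEMMAS AND PROOFS =====

-- substitution performed by `texto.replace(".", " ")`
def pvSubst (c : Char) : Char := if c = '.' then ' ' else c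

-- structural version of splitting on a single space
def pvSplitCh : List Char → List (List Char)
  | [] => [[]]
  | c :: t =>
    if c = ' ' then [] :: pvSplitCh t
    else
      match pvSplitCh t with
      | [] => [[c]]
      | w :: ws => (c :: w) :: ws

def pvMapHead (f : List Char → List Char) : List (List Char) → List (List Char)
  | [] => []
  | w :: ws => f w :: ws

def pvHasXY (w : List Char) : Bool := w.contains 'x' || w.contains 'y'

-- word-list count: every word but the last counts if it has x/y (the first also under a pending flag)
def pvWCount : List (List Char) → Bool → Int
  | [], _ => 0
  | w :: ws, flag =>
    match ws with
    | [] => 0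
    | _ :: _ => (if flag || pvHasXY w then 1 else 0) + pvWCount ws false

-- character-level count matching A's loop
def pvCnt : List Char → Bool → Int
  | [], _ => 0
  | c :: t, flag =>
    if c = ' ' ∨ c = '.' then (if flag then 1 else 0) + pvCnt t false
    else pvCnt t (flag || (c = 'x' || c = 'y'))

lemma pvSplitCh_ne_nil (l : List Char) : pvSplitCh l ≠ [] := by
  induction l with
  | nil => simp [pvSplitCh]
  | cons c t ih =>
    simp only [pvSplitCh]
    split_ifs
    · simp
    · cases h : pvSplitCh t <;> simp

lemma pvReplaceGo (l : List Char) : ∀ (fuel : Nat) (acc : List Char), l.length ≤ fuel →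
    PySem.Chars.replace.go ['.'] [' '] fuel l acc = acc.reverse ++ l.map pvSubst := by
  induction l with
  | nil =>
    intro fuel acc _
    cases fuel <;> simp [PySem.Chars.replace.go]
  | cons c t ih =>
    intro fuel acc hf
    cases fuel with
    | zero => simp at hf
    | succ f =>
      by_cases hc : c = '.'
      · subst hc
        rw [show PySem.Chars.replace.go ['.'] [' '] (f + 1) ('.' :: t) acc
              = PySem.Chars.replace.go ['.'] [' '] f t (' ' :: acc) by
            simp [PySem.Chars.replace.go, List.isPrefixOf]]
        rw [ih f _ (by simpa using hf)]
        simp [pvSubst]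
      · rw [show PySem.Chars.replace.go ['.'] [' '] (f + 1) (c :: t) acc
              = PySem.Chars.replace.go ['.'] [' '] f t (c :: acc) by
            simp [PySem.Chars.replace.go, List.isPrefixOf, beq_iff_eq, Ne.symm hc]]
        rw [ih f _ (by simpa using hf)]
        simp [pvSubst, hc]

lemma pvReplace_eq_map (s : List Char) :
    PySem.Chars.replace s ['.'] [' '] = s.map pvSubst := by
  simp only [PySem.Chars.replace]
  rw [if_neg (by simp)]
  simpa using pvReplaceGo s s.length [] le_rfl

lemma pvSplitGo (l : List Char) : ∀ (fuel : Nat) (cur : List Char) (acc : List (List Char)),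
    l.length < fuel →
    PySem.Chars.splitOn.go [' '] fuel l cur acc
      = acc.reverse ++ pvMapHead (fun w => cur.reverse ++ w) (pvSplitCh l) := by
  induction l with
  | nil =>
    intro fuel cur acc hf
    cases fuel with
    | zero => simp at hf
    | succ f => simp [PySem.Chars.splitOn.go, pvSplitCh, pvMapHead]
  | cons c t ih =>
    intro fuel cur acc hf
    cases fuel with
    | zero => simp at hf
    | succ f =>
      by_cases hc : c = ' '
      · subst hc
        rw [show PySem.Chars.splitOn.go [' '] (f + 1) (' ' :: t) cur acc
              = PySem.Chars.splitOn.go [' '] f t [] (cur.reverse :: acc) by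
            simp [PySem.Chars.splitOn.go, List.isPrefixOf]]
        rw [ih f [] _ (by simp at hf ⊢; omega)]
        cases h : pvSplitCh t with
        | nil => exact absurd h (pvSplitCh_ne_nil t)
        | cons w ws => simp [pvSplitCh, pvMapHead, h]
      · rw [show PySem.Chars.splitOn.go [' '] (f + 1) (c :: t) cur acc
              = PySem.Chars.splitOn.go [' '] f t (c :: cur) acc by
            simp [PySem.Chars.splitOn.go, List.isPrefixOf, beq_iff_eq, Ne.symm hc]]
        rw [ih f (c :: cur) acc (by simp at hf ⊢; omega)]
        simp only [pvSplitCh, if_neg hc]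
        cases h : pvSplitCh t with
        | nil => exact absurd h (pvSplitCh_ne_nil t)
        | cons w ws => simp [pvMapHead]

lemma pvSplitOn_eq (s : List Char) :
    PySem.Chars.splitOn s [' '] = pvSplitCh s := by
  simp only [PySem.Chars.splitOn]
  rw [pvSplitGo s (s.length + 1) [] [] (by omega)]
  cases h : pvSplitCh s with
  | nil => exact absurd h (pvSplitCh_ne_nil s)
  | cons w ws => simp [pvMapHead]

lemma pvIsIn_singleton (c : Char) (w : List Char) :
    PySem.Chars.isIn [c] w = w.contains c := by
  by_cases h : c ∈ w
  · rw [(PySem.Chars.isIn_iff_infix [c] w).2]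
    · simp [List.contains_iff_mem, h]
    · obtain ⟨p, q, rfl⟩ := List.append_of_mem h
      exact ⟨p, q, by simp⟩
  · rw [(PySem.Chars.isIn_eq_false_iff [c] w).2]
    · simp [List.contains_iff_mem, h]
    · intro hinf
      exact h (hinf.subset (by simp))

-- A's fold computes pvCnt
lemma pvFoldA (t : List Char) : ∀ (cl cp : Int) (flag : Bool) (ac : Int),
    (t.foldl
      (fun (st : Int × Int × Bool × Int) caracter =>
        let cont_letras := st.1
        let cont_palabras := st.2.1
        let cont_palabras_x_y := st.2.2.1
        let acum_x_o_y := st.2.2.2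
        if caracter ≠ ' ' ∧ caracter ≠ '.' then
          (cont_letras + 1, cont_palabras,
           (if caracter = 'x' ∨ caracter = 'y' then true else cont_palabras_x_y),
           acum_x_o_y)
        else
          (0,
           (if cont_letras > 0 then cont_palabras + 1 else cont_palabras),
           false,
           (if cont_palabras_x_y = true then acum_x_o_y + 1 else acum_x_o_y)))
      (cl, cp, flag, ac)).2.2.2 = ac + pvCnt t flag := by
  induction t with
  | nil => intro cl cp flag ac; simp [pvCnt]
  | cons c t ih =>
    intro cl cp flag ac
    simp only [List.foldl_cons]
    by_cases hsep : c = ' ' ∨ c = '.'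
    · rw [if_neg (by tauto)]
      rw [ih]
      simp only [pvCnt, if_pos hsep]
      cases flag <;> simp <;> ring
    · push_neg at hsep
      rw [if_pos (by tauto)]
      rw [ih]
      simp only [pvCnt, if_neg (by tauto : ¬ (c = ' ' ∨ c = '.'))]
      by_cases hxy : c = 'x' ∨ c = 'y'
      · rw [if_pos hxy]
        have : (c = 'x' || c = 'y') = true := by
          rcases hxy with h | h <;> simp [h]
        simp [this]
      · rw [if_neg hxy]
        have : (c = 'x' || c = 'y') = false := by
          push_neg at hxy; simp [hxy.1, hxy.2]
        simp [this]

lemma pvHasXY_cons (c : Char) (w : List Char) :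
    pvHasXY (c :: w) = ((c = 'x' || c = 'y') || pvHasXY w) := by
  by_cases hx : c = 'x'
  · subst hx; simp [pvHasXY, List.contains_cons]
  · by_cases hy : c = 'y'
    · subst hy; simp [pvHasXY, List.contains_cons, Bool.or_comm, Bool.or_left_comm]
    · simp [pvHasXY, List.contains_cons, hx, hy, Ne.symm hx, Ne.symm hy]

-- pvCnt equals the word-level count over the split of the substituted string
lemma pvCnt_eq_wcount (s : List Char) : ∀ flag,
    pvCnt s flag = pvWCount (pvSplitCh (s.map pvSubst)) flag := by
  induction s with
  | nil => intro flag; simp [pvCnt, pvSplitCh, pvWCount]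
  | cons c t ih =>
    intro flag
    by_cases hsep : c = ' ' ∨ c = '.'
    · have hsub : pvSubst c = ' ' := by
        rcases hsep with h | h <;> simp [pvSubst, h]
      simp only [pvCnt, if_pos hsep, List.map_cons, hsub, pvSplitCh, if_pos rfl]
      cases h : pvSplitCh (t.map pvSubst) with
      | nil => exact absurd h (pvSplitCh_ne_nil _)
      | cons w ws =>
        rw [ih false]
        simp [h, pvWCount, pvHasXY]
    · push_neg at hsep
      have hsub : pvSubst c = c := by simp [pvSubst, hsep.2]
      have hcsp : ¬ c = ' ' := hsep.1
      simp only [pvCnt, if_neg (by tauto : ¬ (c = ' ' ∨ c = '.')), List.map_cons, hsub,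
        pvSplitCh, if_neg hcsp]
      rw [ih (flag || (c = 'x' || c = 'y'))]
      cases h : pvSplitCh (t.map pvSubst) with
      | nil => exact absurd h (pvSplitCh_ne_nil _)
      | cons w ws =>
        cases ws with
        | nil => simp [pvWCount]
        | cons w2 ws2 =>
          simp only [pvWCount, pvHasXY_cons]
          congr 1
          cases flag <;> cases hb : (c = 'x' || c = 'y') <;>
            simp [Bool.or_assoc, Bool.or_comm, Bool.or_left_comm]

-- pvWCount with no pending flag is B's counting pass over dropLast
lemma pvWCount_eq_fold (ws : List (List Char)) : ∀ (a : Int),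
    (ws.dropLast.foldl (fun acc w => if pvHasXY w then acc + 1 else acc) a)
      = a + pvWCount ws false := by
  induction ws with
  | nil => intro a; simp [pvWCount]
  | cons w ws ih =>
    intro a
    cases ws with
    | nil => simp [pvWCount]
    | cons w2 ws2 =>
      rw [List.dropLast_cons_of_ne_nil (by simp), List.foldl_cons, ih]
      have e : pvWCount (w :: w2 :: ws2) false
          = (if pvHasXY w then 1 else 0) + pvWCount (w2 :: ws2) false := rfl
      rw [e]
      split_ifs <;> ring

-- ===== VERDICT (by name: the statement is the Claim_ definition above) =====
theorem palabra_con_x_o_y_spec : Claim_equal_palabra_con_x_o_y := by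
  intro texto _
  unfold Spec_palabra_con_x_o_y palabra_con_x_o_y palabra_con_x_o_y_alt
  rw [pvFoldA, pvReplace_eq_map, pvSplitOn_eq, PySem.List.slice_to_neg_one]
  have hfun : (fun (acc : Int) (w : List Char) =>
      if PySem.Chars.isIn ['x'] w || PySem.Chars.isIn ['y'] w then acc + 1 else acc)
      = (fun acc w => if pvHasXY w then acc + 1 else acc) := by
    funext acc w
    simp [pvIsIn_singleton, pvHasXY]
  rw [hfun, pvWCount_eq_fold]
  rw [pvCnt_eq_wcount]
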